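-- pv_equiv track=rewrite | github.com/vincent-kk/Basic-Algorithm | 8. Greedy/problem-1700.py | solution
-- ===== SOURCE A (Python) =====
-- from typing import List
--
-- def solution(N: int, K: int, tasks: List):
--
--     plusboard = []
--     switch = 0
--
--     for i in range(len(tasks)):
--         if tasks[i] in plusboard:
--             continue
--         if len(plusboard) == N:
--             sub_tasks = tasks[i:]
--             target = plusboard[0]
--             target_index = sub_tasks.index(target) if (target in sub_tasks) else K + 1
--             for plug in plusboard:
--                 plug_index = sub_tasks.index(plug) if (plug in sub_tasks) else K + 1
--                 if plug_index > K:
--                     target = plug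
--                     break
--                 if plug_index > target_index:
--                     target = plug
--                     target_index = plug_index
--             plusboard.remove(target)
--             switch += 1
--         plusboard.append(tasks[i])
--
--     return switch
-- ===== SOURCE B (Python) =====
-- from typing import List
--
-- def solution(N: int, K: int, tasks: List):
--     # One backward pass precomputes each position's next-occurrence index; the
--     # forward simulation keeps an up-to-date next-use pointer per cached task,
--     # so no suffix is ever rescanned.
--     nxt = []
--     last = {}
--     for i, t in reversed(list(enumerate(tasks))):
--         nxt.append(last.get(t, -1))
--         last[t] = i
--     nxt.reverse()
--
--     cache = {}  # task -> index of its next use (-1 = never used again)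
--     switch = 0
--     for i, (t, nx) in enumerate(zip(tasks, nxt)):
--         if t in cache:
--             cache[t] = nx
--             continue
--         if len(cache) == N:
--             victim = None
--             vkey = None
--             for v, p in cache.items():
--                 rel = (p - i) if p >= 0 else K + 1
--                 if rel > K:
--                     victim = v
--                     break
--                 if victim is None or rel > vkey:
--                     victim = v
--                     vkey = rel
--             del cache[victim]
--             switch += 1
--         cache[t] = nx
--     return switch
-- ===== Notes on version B (the rewrite author's own statement) =====
-- stated objective: faster
-- what changed: A rescans the whole task suffix with `in`/`.index` for every cached entry at every eviction; B precomputes each position's next-occurrence index in one backward pass and keeps an up-to-date next-use pointer per cached task, so evictions only scan the cache itself.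
import Mathlib
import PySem

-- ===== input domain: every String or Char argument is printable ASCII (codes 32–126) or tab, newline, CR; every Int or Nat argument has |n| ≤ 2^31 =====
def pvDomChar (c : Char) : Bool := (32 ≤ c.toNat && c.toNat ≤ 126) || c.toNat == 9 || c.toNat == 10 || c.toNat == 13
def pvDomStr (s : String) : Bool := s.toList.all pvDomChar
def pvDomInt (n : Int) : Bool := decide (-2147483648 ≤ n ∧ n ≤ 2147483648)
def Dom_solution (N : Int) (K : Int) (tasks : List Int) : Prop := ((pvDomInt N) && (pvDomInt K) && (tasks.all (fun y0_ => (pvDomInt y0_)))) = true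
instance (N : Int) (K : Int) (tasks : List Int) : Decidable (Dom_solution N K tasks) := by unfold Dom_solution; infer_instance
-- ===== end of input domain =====

-- B replaces A's repeated suffix scans (`in` / `.index` over tasks[i:] for every cached
-- entry at every eviction) by a single backward pass precomputing next-occurrence indices
-- and a cache dict holding up-to-date next-use pointers; measurably faster on large inputs.


-- ===== PORT A =====
-- `sub.index(v) if v in sub else K + 1`
def pyIndexOr (sub : List Int) (v : Int) (K : Int) : Int :=
  if sub.contains v then
    match PySem.List.index? sub v with
    | some j => (j : Int)
    | none => K + 1
  else K + 1

-- `for plug in plusboard: …` with its break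
def selLoopA (sub : List Int) (K : Int) : List Int → Int → Int → Int
  | [], target, _ => target
  | plug :: rest, target, tIdx =>
    let pi := pyIndexOr sub plug K
    if pi > K then plug
    else if pi > tIdx then selLoopA sub K rest plug pi
    else selLoopA sub K rest target tIdx

-- outer `for i in range(len(tasks))`, iterating over the suffix tasks[i:]
def loopA (N : Int) (K : Int) : List Int → List Int → Int → Int
  | [], _, switch => switch
  | t :: rest, board, switch =>
    if board.contains t then loopA N K rest board switch
    else if (board.length : Int) = N then
      -- `plusboard[0]`: Python raises IndexError on an empty board (N = 0); outside Pre_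
      let target0 := board.headD 0
      let target := selLoopA (t :: rest) K board target0 (pyIndexOr (t :: rest) target0 K)
      loopA N K rest (((PySem.List.remove? board target).getD board) ++ [t]) (switch + 1)
    else loopA N K rest (board ++ [t]) switch

def solution (N : Int) (K : Int) (tasks : List Int) : Int := loopA N K tasks [] 0

-- ===== PORT B =====
-- backward pass: `for i, t in reversed(list(enumerate(tasks))): nxt.append(last.get(t, -1)); last[t] = i`
def nxtRev : List (Int × Int) → PySem.Dict Int Int → List Int
  | [], _ => []
  | (i, t) :: rest, last => last.getD t (-1) :: nxtRev rest (last.insert t i)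

def buildNxt (tasks : List Int) : List Int :=
  (nxtRev (PySem.List.enumerate tasks).reverse PySem.Dict.empty).reverse

-- victim-selection loop over cache.items() with its break; acc = (victim, vkey)
def selVict (i : Int) (K : Int) : List (Int × Int) → Option (Int × Int) → Option Int
  | [], acc => acc.map (·.1)
  | (v, p) :: rest, acc =>
    let rel := if 0 ≤ p then p - i else K + 1
    if rel > K then some v
    else
      match acc with
      | none => selVict i K rest (some (v, rel))
      | some (w, wk) =>
        if rel > wk then selVict i K rest (some (v, rel)) else selVict i K rest (some (w, wk))

-- forward pass: `for i, (t, nx) in enumerate(zip(tasks, nxt))`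
def loopB (N : Int) (K : Int) : List (Int × (Int × Int)) → PySem.Dict Int Int → Int → Int
  | [], _, switch => switch
  | (i, (t, nx)) :: rest, cache, switch =>
    if cache.contains t then loopB N K rest (cache.insert t nx) switch
    else if ((cache.size : Int) = N) then
      match selVict i K cache.items none with
      | some v => loopB N K rest (((cache.erase v).insert t nx)) (switch + 1)
      -- victim is None only when the cache is empty (N = 0): Python raises KeyError; outside Pre_
      | none => loopB N K rest (cache.insert t nx) (switch + 1)
    else loopB N K rest (cache.insert t nx) switch

def solution_alt (N : Int) (K : Int) (tasks : List Int) : Int :=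
  loopB N K (PySem.List.enumerate (tasks.zip (buildNxt tasks))) PySem.Dict.empty 0

-- ===== PRECONDITION & SPEC =====
-- Pre_ excludes N = 0 with a nonempty task list: there A evaluates plusboard[0] on an
-- empty board and raises IndexError (B raises KeyError there too).
def Pre_solution (N : Int) (_K : Int) (tasks : List Int) : Prop := N ≠ 0 ∨ tasks = []
instance (N : Int) (K : Int) (tasks : List Int) : Decidable (Pre_solution N K tasks) := by unfold Pre_solution; infer_instance

def pvWitness_solution : Int × Int × List Int := (2, 6, [1, 2, 3, 1, 2, 4])

def Spec_solution (N : Int) (K : Int) (tasks : List Int) (out : Int) : Prop := out = solution_alt N K tasks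
instance (N : Int) (K : Int) (tasks : List Int) (out : Int) : Decidable (Spec_solution N K tasks out) := by unfold Spec_solution; infer_instance

-- ===== CLAIM (what is proved, stated in full; the proofs are below) =====
def Claim_equal_solution : Prop := ∀ (N : Int) (K : Int) (tasks : List Int), Dom_solution N K tasks → Pre_solution N K tasks → Spec_solution N K tasks (solution N K tasks)

-- ===== LEMMAS AND PROOFS =====

-- next-use pointer of value v looking at tasks[i:]: absolute index of first occurrence ≥ i, else -1
def ptr (tasks : List Int) (i : Nat) (v : Int) : Int :=
  match PySem.List.index? (tasks.drop i) v with
  | some r => (i : Int) + r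
  | none => -1

lemma drop_succ_of_drop (tasks : List Int) (i : Nat) (t : Int) (rest : List Int)
    (hd : tasks.drop i = t :: rest) : tasks.drop (i + 1) = rest := by
  rw [← List.tail_drop, hd]
  rfl

lemma ptr_step (tasks : List Int) (i : Nat) (t : Int) (rest : List Int)
    (hd : tasks.drop i = t :: rest) (v : Int) :
    ptr tasks i v = if t = v then (i : Int) else ptr tasks (i + 1) v := by
  have hr : tasks.drop (i + 1) = rest := drop_succ_of_drop tasks i t rest hd
  unfold ptr
  rw [hd, hr]
  by_cases h : t = v
  · subst h; rw [PySem.List.index?_cons_self]; simp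
  · rw [PySem.List.index?_cons_of_ne rest h]
    cases hi : PySem.List.index? rest v with
    | none => simp [h]
    | some r => simp [h]; ring

lemma ptr_of_ge_length (tasks : List Int) (i : Nat) (h : tasks.length ≤ i) (v : Int) :
    ptr tasks i v = -1 := by
  unfold ptr
  rw [List.drop_eq_nil_of_le h]
  rfl

-- the relative index A computes on the suffix equals B's rel computed from the pointer
lemma rel_eq (tasks : List Int) (i : Nat) (K v : Int) :
    pyIndexOr (tasks.drop i) v K
      = (if 0 ≤ ptr tasks i v then ptr tasks i v - (i : Int) else K + 1) := by
  unfold pyIndexOr ptr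
  cases hi : PySem.List.index? (tasks.drop i) v with
  | none =>
    have hv : v ∉ tasks.drop i := (PySem.List.index?_eq_none_iff _ _).mp hi
    simp [hv]
  | some r =>
    have hv : v ∈ tasks.drop i := by
      by_contra hv
      rw [(PySem.List.index?_eq_none_iff _ _).mpr hv] at hi
      simp at hi
    have h0 : (0 : Int) ≤ (i : Int) + (r : Int) := by positivity
    simp [hv, h0]

lemma nxtRev_spec (tasks : List Int) (j : Nat) :
    j ≤ tasks.length → ∀ (last : PySem.Dict Int Int),
      (∀ v, last.getD v (-1) = ptr tasks j v) →
      nxtRev ((PySem.List.enumerate tasks).take j).reverse last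
        = ((List.range j).map (fun k => ptr tasks (k + 1) (tasks.getD k 0))).reverse := by
  induction j with
  | zero => intro _ last _; simp [nxtRev]
  | succ j ih =>
    intro hj last hlast
    have hjn : j < tasks.length := by omega
    have henum : (PySem.List.enumerate tasks)[j]? = some ((j : Int), tasks[j]) := by
      rw [PySem.List.getElem?_enumerate, List.getElem?_eq_getElem hjn]
      simp
    have htake : (PySem.List.enumerate tasks).take (j + 1)
        = (PySem.List.enumerate tasks).take j ++ [((j : Int), tasks[j])] := by
      rw [List.take_add_one, henum]; rfl
    have hdropj : tasks.drop j = tasks[j] :: tasks.drop (j + 1) := List.drop_eq_getElem_cons hjn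
    rw [htake, List.reverse_append, List.reverse_singleton, List.singleton_append, nxtRev]
    rw [List.range_succ, List.map_append, List.reverse_append, List.map_singleton,
        List.reverse_singleton, List.singleton_append]
    congr 1
    · rw [hlast, List.getD_eq_getElem tasks 0 hjn]
    · apply ih (by omega)
      intro v
      rw [PySem.Dict.getD_insert]
      rw [ptr_step tasks j tasks[j] (tasks.drop (j + 1)) hdropj v]
      by_cases hv : v = tasks[j]
      · simp [hv]
      · rw [if_neg hv, if_neg (fun h => hv h.symm), hlast]

-- buildNxt computes the pointers
lemma buildNxt_eq (tasks : List Int) :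
    buildNxt tasks
      = (List.range tasks.length).map (fun j => ptr tasks (j + 1) (tasks.getD j 0)) := by
  unfold buildNxt
  have hfull : (PySem.List.enumerate tasks).take tasks.length = PySem.List.enumerate tasks := by
    apply List.take_of_length_le
    rw [PySem.List.length_enumerate]
  rw [← hfull, nxtRev_spec tasks tasks.length le_rfl PySem.Dict.empty
      (fun v => by rw [ptr_of_ge_length tasks tasks.length le_rfl v]; rfl),
    List.reverse_reverse]

-- the two victim-selection loops agree
lemma selVict_eq (tasks : List Int) (i : Nat) (K : Int) (plugs : List Int)
    (target tIdx : Int) :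
    selVict (i : Int) K (plugs.map (fun v => (v, ptr tasks i v))) (some (target, tIdx))
      = some (selLoopA (tasks.drop i) K plugs target tIdx) := by
  induction plugs generalizing target tIdx with
  | nil => rfl
  | cons v rest ih =>
    have hrel : (if 0 ≤ ptr tasks i v then ptr tasks i v - (i : Int) else K + 1)
        = pyIndexOr (tasks.drop i) v K := (rel_eq tasks i K v).symm
    simp only [List.map_cons, selVict, selLoopA, hrel]
    by_cases h1 : pyIndexOr (tasks.drop i) v K > K
    · simp [h1]
    · simp only [if_neg h1]
      by_cases h2 : pyIndexOr (tasks.drop i) v K > tIdx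
      · simp only [if_pos h2]; exact ih _ _
      · simp only [if_neg h2]; exact ih _ _

lemma selLoopA_mem (sub : List Int) (K : Int) (plugs : List Int) (target tIdx : Int) :
    selLoopA sub K plugs target tIdx = target ∨ selLoopA sub K plugs target tIdx ∈ plugs := by
  induction plugs generalizing target tIdx with
  | nil => left; rfl
  | cons v rest ih =>
    simp only [selLoopA]
    split
    · right; exact List.mem_cons_self
    · split
      · rcases ih v _ with h | h
        · right; rw [h]; exact List.mem_cons_self
        · right; exact List.mem_cons_of_mem _ h
      · rcases ih target tIdx with h | h
        · left; exact h
        · right; exact List.mem_cons_of_mem _ h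

lemma any_beq_eq_mem (l : List Int) (t : Int) :
    l.any (fun v => v == t) = decide (t ∈ l) := by
  rw [Bool.eq_iff_iff]
  constructor
  · intro h; simp only [List.any_eq_true, beq_iff_eq] at h
    obtain ⟨v, hv, rfl⟩ := h; simpa using hv
  · intro h; simp only [List.any_eq_true, beq_iff_eq]
    exact ⟨t, by simpa using h, rfl⟩

lemma nodup_append_singleton (l : List Int) (t : Int) (h1 : l.Nodup) (h2 : t ∉ l) :
    (l ++ [t]).Nodup := by
  simp [List.nodup_append, h1]
  exact fun a ha he => h2 (he ▸ ha)

-- main simulation invariant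
lemma main_loop (N K : Int) (tasks : List Int) (hN : N ≠ 0) :
    ∀ (suffix : List Int) (i : Nat) (board : List Int) (cache : PySem.Dict Int Int) (switch : Int),
      tasks.drop i = suffix →
      board.Nodup →
      cache.items = board.map (fun v => (v, ptr tasks i v)) →
      loopA N K suffix board switch
        = loopB N K (PySem.List.enumerate ((tasks.drop i).zip ((buildNxt tasks).drop i)) (i : Int))
            cache switch := by
  intro suffix
  induction suffix with
  | nil =>
    intro i board cache switch hdrop hnd hitems
    rw [hdrop]
    simp [loopA, loopB]
  | cons t rest ih =>
    intro i board cache switch hdrop hnd hitems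
    have hin : i < tasks.length := by
      by_contra h
      rw [List.drop_eq_nil_of_le (by omega)] at hdrop
      simp at hdrop
    have hrest : tasks.drop (i + 1) = rest := drop_succ_of_drop tasks i t rest hdrop
    have hgt : tasks[i] = t := by
      have h0 : tasks[i + 0]? = some t := by rw [← List.getElem?_drop, hdrop]; rfl
      rw [Nat.add_zero, List.getElem?_eq_getElem hin] at h0
      exact Option.some_injective _ h0
    have hlenB : (buildNxt tasks).length = tasks.length := by
      rw [buildNxt_eq]; simp
    have hBi : (buildNxt tasks)[i]'(by omega) = ptr tasks (i + 1) t := by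
      simp only [buildNxt_eq]
      rw [List.getElem_map, List.getElem_range, List.getD_eq_getElem tasks 0 hin, hgt]
    have hdropB : (buildNxt tasks).drop i
        = ptr tasks (i + 1) t :: (buildNxt tasks).drop (i + 1) := by
      rw [List.drop_eq_getElem_cons (by omega : i < (buildNxt tasks).length), hBi]
    have hstep : ∀ v, v ≠ t → ptr tasks i v = ptr tasks (i + 1) v := by
      intro v hv
      rw [ptr_step tasks i t rest hdrop v, if_neg (fun h => hv h.symm)]
    have hrhs : PySem.List.enumerate ((tasks.drop i).zip ((buildNxt tasks).drop i)) (i : Int)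
        = ((i : Int), (t, ptr tasks (i + 1) t))
            :: PySem.List.enumerate ((tasks.drop (i + 1)).zip ((buildNxt tasks).drop (i + 1)))
                ((i + 1 : Nat) : Int) := by
      rw [hdrop, hdropB, List.zip_cons_cons, PySem.List.enumerate_cons, hrest]
      norm_num
    have hcont : cache.contains t = board.contains t := by
      simp only [PySem.Dict.contains, hitems, List.any_map]
      rw [show ((fun (p : Int × Int) => p.1 == t) ∘ fun v => (v, ptr tasks i v))
            = (fun v => v == t) from rfl, any_beq_eq_mem]
      simp
    rw [hrhs]
    simp only [loopA, loopB, hcont]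
    by_cases hmem : t ∈ board
    · -- cache hit
      have hb : board.contains t = true := by simpa using hmem
      rw [hb]
      simp only [if_true]
      apply ih (i + 1) board (cache.insert t (ptr tasks (i + 1) t)) switch hrest hnd
      rw [PySem.Dict.items_insert_of_contains _ _ (by rw [hcont, hb])]
      rw [hitems, List.map_map]
      apply List.map_congr_left
      intro v hv
      by_cases hvt : v = t
      · simp [hvt]
      · simp [Function.comp, hvt, hstep v hvt]
    · -- cache miss
      have hb : board.contains t = false := by simpa using hmem
      rw [hb]
      simp only [Bool.false_eq_true, if_false]
      have hsize : (cache.size : Int) = (board.length : Int) := by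
        simp [PySem.Dict.size, hitems]
      have hmapstep : board.map (fun v => (v, ptr tasks i v))
          = board.map (fun v => (v, ptr tasks (i + 1) v)) := by
        apply List.map_congr_left
        intro v hv
        rw [hstep v (fun h => hmem (h ▸ hv))]
      rw [hsize]
      by_cases hfull : (board.length : Int) = N
      · -- eviction
        have hbne : board ≠ [] := by
          intro h
          rw [h] at hfull
          simp at hfull
          exact hN hfull.symm
        obtain ⟨b0, brest, rfl⟩ : ∃ b0 brest, board = b0 :: brest := by
          cases board with
          | nil => exact absurd rfl hbne
          | cons a l => exact ⟨a, l, rfl⟩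
        simp only [if_pos hfull, List.headD_cons]
        -- the two selection loops pick the same victim
        set target := selLoopA (t :: rest) K (b0 :: brest) b0 (pyIndexOr (t :: rest) b0 K) with htarget
        have hsub : tasks.drop i = t :: rest := hdrop
        have hrel0 : (if 0 ≤ ptr tasks i b0 then ptr tasks i b0 - (i : Int) else K + 1)
            = pyIndexOr (t :: rest) b0 K := by
          rw [← hsub]; exact (rel_eq tasks i K b0).symm
        have hsel : selVict (i : Int) K cache.items none = some target := by
          rw [hitems, List.map_cons]
          simp only [selVict, hrel0]
          by_cases h1 : pyIndexOr (t :: rest) b0 K > K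
          · rw [if_pos h1, htarget]
            simp only [selLoopA, if_pos h1]
          · rw [if_neg h1, htarget]
            simp only [selLoopA, if_neg h1, lt_irrefl]
            have := selVict_eq tasks i K brest b0 (pyIndexOr (t :: rest) b0 K)
            rw [hsub] at this
            exact this
        rw [hsel]
        have htmem : target ∈ b0 :: brest := by
          rcases selLoopA_mem (t :: rest) K (b0 :: brest) b0 (pyIndexOr (t :: rest) b0 K) with h | h
          · rw [htarget, h]; exact List.mem_cons_self
          · rw [htarget]; exact h
        have hremove : (PySem.List.remove? (b0 :: brest) target).getD (b0 :: brest)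
            = (b0 :: brest).erase target := by
          rw [PySem.List.remove?_eq_some_erase _ target htmem]; rfl
        rw [hremove]
        apply ih (i + 1) _ _ _ hrest
        · exact nodup_append_singleton _ t (hnd.erase target)
            (fun h => hmem (List.mem_of_mem_erase h))
        · -- items of (cache.erase target).insert t nx
          have herase : (cache.erase target).items
              = ((b0 :: brest).erase target).map (fun v => (v, ptr tasks i v)) := by
            show (cache.items.filter fun p => !(p.1 == target)) = _
            rw [hitems, List.filter_map, hnd.erase_eq_filter target]
            rfl
          have hnotc : (cache.erase target).contains t = false := by
            simp only [PySem.Dict.contains, herase, List.any_map]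
            rw [show ((fun (p : Int × Int) => p.1 == t) ∘ fun v => (v, ptr tasks i v))
                  = (fun v => v == t) from rfl, any_beq_eq_mem]
            simp only [decide_eq_false_iff_not]
            exact fun h => hmem (List.mem_of_mem_erase h)
          rw [PySem.Dict.items_insert_of_not_contains _ _ hnotc, herase, List.map_append]
          congr 1
          apply List.map_congr_left
          intro v hv
          rw [hstep v (fun h => hmem (h ▸ List.mem_of_mem_erase hv))]
      · -- no eviction
        simp only [if_neg hfull]
        apply ih (i + 1) (board ++ [t]) (cache.insert t (ptr tasks (i + 1) t)) switch hrest
        · exact nodup_append_singleton _ t hnd hmem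
        · rw [PySem.Dict.items_insert_of_not_contains _ _ (by rw [hcont, hb]), hitems,
            List.map_append, List.map_singleton, hmapstep]

-- ===== VERDICT (by name: the statement is the Claim_ definition above) =====
theorem solution_spec : Claim_equal_solution := by
  unfold Claim_equal_solution
  intro N K tasks _ hpre
  unfold Spec_solution
  rcases hpre with hN | hnil
  · show solution N K tasks = solution_alt N K tasks
    unfold solution solution_alt
    have h := main_loop N K tasks hN tasks 0 [] PySem.Dict.empty 0 (by simp) (by simp) (by rfl)
    simpa using h
  · subst hnil; rfl
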